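-- pv_equiv track=rewrite | github.com/Latens-ZK/core | backend/src/crypto/address_utils.py | _validate_basic
-- ===== SOURCE A (Python) =====
-- def _validate_basic(address: str) -> bool:
--     """Basic prefix + length validation fallback."""
--     if len(address) < 26 or len(address) > 90:
--         return False
--     if not address.startswith(('1', '3', 'bc1')):
--         return False
--     # Check character set (Base58 or Bech32)
--     base58_chars = set('123456789ABCDEFGHJKLMNPQRSTUVWXYZabcdefghijkmnopqrstuvwxyz')
--     bech32_chars = set('qpzry9x8gf2tvdw0s3jn54khce6mua7l')
--     if address.lower().startswith('bc1'):
--         return all(c in bech32_chars for c in address[3:].lower())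
--     else:
--         return all(c in base58_chars for c in address)
-- ===== SOURCE B (Python) =====
-- import re
--
-- _B58_RE = re.compile(r'[13][1-9A-HJ-NP-Za-km-z]{25,89}')
-- _B32_RE = re.compile(r'bc1(?i:[qpzry9x8gf2tvdw0s3jn54khce6mua7l]){23,87}')
--
--
-- def _validate_basic(address: str) -> bool:
--     """Basic prefix + length validation fallback."""
--     return bool(_B58_RE.fullmatch(address) or _B32_RE.fullmatch(address))
-- ===== Notes on version B (the rewrite author's own statement) =====
-- stated objective: idiomatic
-- what changed: B replaces A's length guard, tuple-startswith guard and two explicit per-character all() loops over charset sets by two precompiled anchored regular expressions (a case-sensitive Base58 pattern [13][1-9A-HJ-NP-Za-km-z]{25,89} and a bech32 pattern bc1 followed by a scoped-IGNORECASE class {23,87}) and returns whether either fullmatch succeeds; the 26-90 length bound is encoded in the quantifiers.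
import Mathlib
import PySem

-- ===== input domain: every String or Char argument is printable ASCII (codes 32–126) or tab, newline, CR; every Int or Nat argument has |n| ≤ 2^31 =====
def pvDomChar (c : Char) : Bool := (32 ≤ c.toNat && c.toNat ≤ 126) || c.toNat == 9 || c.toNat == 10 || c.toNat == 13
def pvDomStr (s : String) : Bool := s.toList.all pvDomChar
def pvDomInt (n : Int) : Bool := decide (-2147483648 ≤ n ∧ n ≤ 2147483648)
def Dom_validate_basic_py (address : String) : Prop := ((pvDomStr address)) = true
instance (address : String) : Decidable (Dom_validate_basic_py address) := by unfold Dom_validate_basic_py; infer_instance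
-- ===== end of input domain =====

-- B replaces A's guard-and-branch charset loops by two anchored regular expressions
-- (fullmatch against a Base58 pattern or a bech32 pattern); same return value everywhere.

-- ===== PORT A =====
def validate_basic_py (address : String) : Bool :=
  if PySem.Str.len address < 26 ∨ PySem.Str.len address > 90 then false
  else if !(PySem.Str.startswith address "1" || PySem.Str.startswith address "3" ||
            PySem.Str.startswith address "bc1") then false
  else
    let base58_chars : PySem.Set Char :=
      PySem.Set.ofList "123456789ABCDEFGHJKLMNPQRSTUVWXYZabcdefghijkmnopqrstuvwxyz".toList
    let bech32_chars : PySem.Set Char :=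
      PySem.Set.ofList "qpzry9x8gf2tvdw0s3jn54khce6mua7l".toList
    if PySem.Str.startswith (PySem.Str.lower address) "bc1" then
      (PySem.Str.lower (PySem.Str.slice address (some 3) none)).toList.all
        (fun c => PySem.Set.contains bech32_chars c)
    else
      address.toList.all (fun c => PySem.Set.contains base58_chars c)

-- ===== PORT B =====
-- Source B uses two precompiled regexes; the regex engine is not in PySem/Mathlib, so each
-- fullmatch is ported BY HAND, step for step, exactly for its pattern (comments say where).

-- the char class [1-9A-HJ-NP-Za-km-z] of _B58_RE: its ranges expanded, in pattern order (exact)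
def pvB58Class : List Char := "123456789ABCDEFGHJKLMNPQRSTUVWXYZabcdefghijkmnopqrstuvwxyz".toList
-- the char class [qpzry9x8gf2tvdw0s3jn54khce6mua7l] of _B32_RE, in pattern order
def pvB32Class : List Char := "qpzry9x8gf2tvdw0s3jn54khce6mua7l".toList

-- _B58_RE.fullmatch(s): anchored '[13]' then 25..89 class chars then end of string (exact
-- semantics of this pattern on any string)
def pvB58Fullmatch (l : List Char) : Bool :=
  match l with
  | c :: rest =>
      (c == '1' || c == '3') && decide (25 ≤ rest.length ∧ rest.length ≤ 89) &&
        rest.all (fun d => pvB58Class.contains d)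
  | [] => false

-- _B32_RE.fullmatch(s): anchored literal 'bc1' then 23..87 chars of the class under (?i:…)
-- then end of string; IGNORECASE class matching is lowerChar-membership (exact on ASCII)
def pvB32Fullmatch (l : List Char) : Bool :=
  match l with
  | b :: c :: o :: rest =>
      b == 'b' && c == 'c' && o == '1' &&
        decide (23 ≤ rest.length ∧ rest.length ≤ 87) &&
        rest.all (fun d => pvB32Class.contains (PySem.Chars.lowerChar d))
  | _ => false

def validate_basic_py_alt (address : String) : Bool :=
  pvB58Fullmatch address.toList || pvB32Fullmatch address.toList

-- ===== PRECONDITION & SPEC =====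
def Spec_validate_basic_py (address : String) (out : Bool) : Prop := out = validate_basic_py_alt address
instance (address : String) (out : Bool) : Decidable (Spec_validate_basic_py address out) := by unfold Spec_validate_basic_py; infer_instance

-- ===== CLAIM (what is proved, stated in full; the proofs are below) =====
def Claim_equal_validate_basic_py : Prop := ∀ (address : String), Dom_validate_basic_py address → Spec_validate_basic_py address (validate_basic_py address)

-- ===== LEMMAS AND PROOFS =====

-- A's set literals have no duplicate characters, so Set.ofList leaves them unchanged
set_option maxRecDepth 4000 in
theorem pv_ofList58 :
    PySem.Set.ofList "123456789ABCDEFGHJKLMNPQRSTUVWXYZabcdefghijkmnopqrstuvwxyz".toList = pvB58Class := by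
  decide

theorem pv_ofList32 :
    PySem.Set.ofList "qpzry9x8gf2tvdw0s3jn54khce6mua7l".toList = pvB32Class := by
  decide

theorem pv_contains (l : List Char) (c : Char) : PySem.Set.contains l c = l.contains c := rfl

theorem pvB32_false {l : List Char} (h : ¬ PySem.Chars.startswith l ['b','c','1'] = true) :
    pvB32Fullmatch l = false := by
  rcases l with _ | ⟨a, _ | ⟨b, _ | ⟨d, r⟩⟩⟩
  · rfl
  · rfl
  · rfl
  · by_cases ha : a = 'b' ∧ b = 'c' ∧ d = '1'
    · obtain ⟨rfl, rfl, rfl⟩ := ha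
      exact absurd (by rw [PySem.Chars.startswith_iff]; exact ⟨r, by simp⟩) h
    · simp only [pvB32Fullmatch, Bool.and_eq_false_iff, beq_eq_false_iff_ne, ne_eq]
      tauto

-- the two ports, both over the character list of the address, agree
theorem pv_list (l : List Char) :
    (if (l.length : Int) < 26 ∨ (l.length : Int) > 90 then false
     else
       if (!(PySem.Chars.startswith l ['1'] || PySem.Chars.startswith l ['3'] ||
             PySem.Chars.startswith l ['b', 'c', '1'])) = true then false
       else
         if PySem.Chars.startswith (PySem.Chars.lower l) ['b', 'c', '1'] = true then
           (PySem.Chars.lower (PySem.Chars.slice l (some 3) none)).all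
             (fun c => pvB32Class.contains c)
         else
           l.all fun c => pvB58Class.contains c) =
    (pvB58Fullmatch l || pvB32Fullmatch l) := by
  rcases l with _ | ⟨c, t⟩
  · simp [pvB58Fullmatch, pvB32Fullmatch]
  · by_cases hb : PySem.Chars.startswith (c :: t) ['b','c','1'] = true
    · rw [PySem.Chars.startswith_iff] at hb
      obtain ⟨t', ht⟩ := hb
      simp only [List.cons_append, List.nil_append, List.cons.injEq] at ht
      obtain ⟨rfl, rfl⟩ := ht
      have hlow : PySem.Chars.startswith (PySem.Chars.lower ('b'::'c'::'1'::t')) ['b','c','1'] = true := by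
        rw [PySem.Chars.startswith_iff]
        refine ⟨PySem.Chars.lower t', ?_⟩
        simp [PySem.Chars.lower]
        decide
      have hsw : PySem.Chars.startswith ('b'::'c'::'1'::t') ['b','c','1'] = true := by
        rw [PySem.Chars.startswith_iff]; exact ⟨t', by simp⟩
      have hslice : PySem.Chars.slice ('b'::'c'::'1'::t') (some 3) none = t' := by
        rw [PySem.Chars.slice_eq_listSlice]
        rw [show (3 : Int) = ((3 : Nat) : Int) from rfl, PySem.List.slice_from_natCast]
        rfl
      have hlowall : (PySem.Chars.lower t').all (fun c => pvB32Class.contains c) =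
          t'.all (fun d => pvB32Class.contains (PySem.Chars.lowerChar d)) := by
        show ((t'.map PySem.Chars.lowerChar).all _) = _
        rw [List.all_map]
        rfl
      have hb58 : pvB58Fullmatch ('b'::'c'::'1'::t') = false := by
        simp [pvB58Fullmatch]
      by_cases hlen : (26:Int) ≤ (('b'::'c'::'1'::t').length : Int) ∧
          (('b'::'c'::'1'::t').length : Int) ≤ 90
      · have hlen' : 23 ≤ t'.length ∧ t'.length ≤ 87 := by
          simp only [List.length_cons] at hlen; push_cast at hlen; omega
        rw [if_neg (by omega), if_neg (by simp [hsw]), if_pos hlow, hslice, hlowall, hb58]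
        simp [pvB32Fullmatch, decide_eq_true hlen']
      · have hlen' : ¬ (23 ≤ t'.length ∧ t'.length ≤ 87) := by
          simp only [List.length_cons] at hlen; push_cast at hlen; omega
        rw [if_pos (by omega), hb58]
        simp [pvB32Fullmatch, decide_eq_false hlen']
    · have h32 : pvB32Fullmatch (c :: t) = false := pvB32_false hb
      by_cases hc : c = '1' ∨ c = '3'
      · have hlowf : PySem.Chars.startswith (PySem.Chars.lower (c::t)) ['b','c','1'] = false := by
          rw [Bool.eq_false_iff]
          intro hcon
          rw [PySem.Chars.startswith_iff] at hcon
          obtain ⟨u, hu⟩ := hcon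
          rcases hc with rfl | rfl <;> simp [PySem.Chars.lower] at hu <;>
            exact absurd hu.1 (by decide)
        have hswt : (PySem.Chars.startswith (c::t) ['1'] || PySem.Chars.startswith (c::t) ['3'] ||
            PySem.Chars.startswith (c::t) ['b','c','1']) = true := by
          rcases hc with rfl | rfl <;>
            simp [PySem.Chars.startswith_iff, List.prefix_cons_iff]
        have hcin : pvB58Class.contains c = true := by
          rcases hc with rfl | rfl <;> decide
        by_cases hlen : (26:Int) ≤ ((c::t).length : Int) ∧ ((c::t).length : Int) ≤ 90
        · have hlen' : 25 ≤ t.length ∧ t.length ≤ 89 := by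
            simp only [List.length_cons] at hlen; push_cast at hlen; omega
          rw [if_neg (by omega), if_neg (by simp [hswt]), if_neg (by simp [hlowf]), h32]
          simp [pvB58Fullmatch, decide_eq_true hlen', List.all_cons]
          rcases hc with rfl | rfl <;> congr 1
        · have hlen' : ¬ (25 ≤ t.length ∧ t.length ≤ 89) := by
            simp only [List.length_cons] at hlen; push_cast at hlen; omega
          rw [if_pos (by omega), h32]
          simp [pvB58Fullmatch, decide_eq_false hlen']
      · obtain ⟨hc1, hc2⟩ := not_or.mp hc
        have e1 : PySem.Chars.startswith (c::t) ['1'] = false := by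
          rw [Bool.eq_false_iff]
          intro hcon
          rw [PySem.Chars.startswith_iff] at hcon
          obtain ⟨u, hu⟩ := hcon
          simp at hu
          exact hc1 hu.1.symm
        have e3 : PySem.Chars.startswith (c::t) ['3'] = false := by
          rw [Bool.eq_false_iff]
          intro hcon
          rw [PySem.Chars.startswith_iff] at hcon
          obtain ⟨u, hu⟩ := hcon
          simp at hu
          exact hc2 hu.1.symm
        have hbf : PySem.Chars.startswith (c::t) ['b','c','1'] = false :=
          Bool.eq_false_iff.mpr hb
        have hB58 : pvB58Fullmatch (c :: t) = false := by
          simp [pvB58Fullmatch, hc1, hc2]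
        rw [h32, hB58]
        by_cases hlen : (26:Int) ≤ ((c::t).length : Int) ∧ ((c::t).length : Int) ≤ 90
        · rw [if_neg (by omega), if_pos (by simp [e1, e3, hbf])]
          simp
        · rw [if_pos (by omega)]
          simp

-- ===== VERDICT (by name: the statement is the Claim_ definition above) =====
theorem validate_basic_py_spec : Claim_equal_validate_basic_py := by
  intro address _
  show validate_basic_py address = validate_basic_py_alt address
  simp only [validate_basic_py, validate_basic_py_alt, pv_ofList58, pv_ofList32, pv_contains,
    PySem.Str.startswith_eq, PySem.Str.len_eq, PySem.Str.lower, PySem.Str.slice,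
    String.toList_ofList,
    show ("1".toList) = ['1'] from by simp,
    show ("3".toList) = ['3'] from by simp,
    show ("bc1".toList) = ['b', 'c', '1'] from by simp]
  exact pv_list address.toList
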